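-- pv_equiv track=rewrite | github.com/Real-Proxy/projectz | extract/llm_utils.py | deduplicate_endpoints
-- ===== SOURCE A (Python) =====
-- def deduplicate_endpoints(endpoints):
--     """
--     Deduplicates endpoints based on (method, path) tuple.
--     """
--     seen = set()
--     unique = []
--
--     for ep in endpoints:
--         key = (ep.get("method"), ep.get("path"))
--         if key not in seen:
--             seen.add(key)
--             unique.append(ep)
--
--     return unique
-- ===== SOURCE B (Python) =====
-- def deduplicate_endpoints(endpoints):
--     """
--     Deduplicates endpoints based on (method, path) tuple.
--     """
--     def key(ep):
--         return (ep.get("method"), ep.get("path"))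
--     return [ep for i, ep in enumerate(endpoints)
--             if all(key(prev) != key(ep) for prev in endpoints[:i])]
-- ===== Notes on version B (the rewrite author's own statement) =====
-- stated objective: alternative
-- what changed: Replaces A's stateful single pass with a seen-set and result-list by a stateless quadratic comprehension: an endpoint is kept iff no earlier endpoint in the list has the same (method, path) key, so no auxiliary set or membership state is maintained at all.
import Mathlib
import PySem

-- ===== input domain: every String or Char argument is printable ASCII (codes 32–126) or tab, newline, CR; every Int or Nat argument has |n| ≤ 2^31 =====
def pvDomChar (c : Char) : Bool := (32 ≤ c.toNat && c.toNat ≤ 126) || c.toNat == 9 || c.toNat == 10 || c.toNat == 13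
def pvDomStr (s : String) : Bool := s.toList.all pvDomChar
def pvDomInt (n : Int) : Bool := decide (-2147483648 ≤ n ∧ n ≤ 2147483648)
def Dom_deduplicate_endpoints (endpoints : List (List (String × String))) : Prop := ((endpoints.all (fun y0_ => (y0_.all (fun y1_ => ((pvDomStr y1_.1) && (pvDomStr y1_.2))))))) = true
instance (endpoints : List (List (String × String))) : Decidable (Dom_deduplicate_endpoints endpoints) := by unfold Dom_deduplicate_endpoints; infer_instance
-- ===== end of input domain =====

-- B replaces A's stateful seen-set pass by a stateless quadratic comprehension
-- (keep ep iff no earlier endpoint has the same (method, path) key); same result, no speed claim.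

-- key = (ep.get("method"), ep.get("path")), common to both Pythons
def pvKey (ep : List (String × String)) : Option String × Option String :=
  ((PySem.Dict.mk ep).get? "method", (PySem.Dict.mk ep).get? "path")

-- ===== PORT A =====
def deduplicate_endpoints (endpoints : List (List (String × String))) : List (List (String × String)) :=
  (endpoints.foldl
    (fun (st : PySem.Set (Option String × Option String) × List (List (String × String))) ep =>
      let key := pvKey ep
      if PySem.Set.contains st.1 key then st
      else (PySem.Set.add st.1 key, st.2 ++ [ep]))
    (PySem.Set.empty, [])).2

-- ===== PORT B =====
def deduplicate_endpoints_alt (endpoints : List (List (String × String))) : List (List (String × String)) :=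
  ((PySem.List.enumerate endpoints 0).filter
    (fun p => (PySem.List.slice endpoints none (some p.1)).all
      (fun prev => !(pvKey prev == pvKey p.2)))).map (·.2)

-- ===== PRECONDITION & SPEC =====
def Spec_deduplicate_endpoints (endpoints : List (List (String × String))) (out : List (List (String × String))) : Prop := out = deduplicate_endpoints_alt endpoints
instance (endpoints : List (List (String × String))) (out : List (List (String × String))) : Decidable (Spec_deduplicate_endpoints endpoints out) := by unfold Spec_deduplicate_endpoints; infer_instance

-- ===== CLAIM =====
def Claim_equal_deduplicate_endpoints : Prop := ∀ (endpoints : List (List (String × String))), Dom_deduplicate_endpoints endpoints → Spec_deduplicate_endpoints endpoints (deduplicate_endpoints endpoints)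

-- ===== LEMMAS AND PROOFS =====

-- proof-only name for A's loop body (definitionally equal to the lambda in the port)
def stepA (st : PySem.Set (Option String × Option String) × List (List (String × String)))
    (ep : List (String × String)) :
    PySem.Set (Option String × Option String) × List (List (String × String)) :=
  let key := pvKey ep
  if PySem.Set.contains st.1 key then st
  else (PySem.Set.add st.1 key, st.2 ++ [ep])

-- Main invariant: processing the suffix l after an already-processed prefix pre whose keys
-- are exactly the members of the set s gives A's accumulated list u followed by B's
-- prefix-scan filter over l (indices start at pre.length, prefixes taken from pre ++ l).
theorem dedup_invariant (l pre u : List (List (String × String)))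
    (s : PySem.Set (Option String × Option String))
    (hs : ∀ k, PySem.Set.contains s k = decide (k ∈ pre.map pvKey)) :
    (l.foldl stepA (s, u)).2 =
      u ++ ((PySem.List.enumerate l (pre.length : Int)).filter
        (fun p => (PySem.List.slice (pre ++ l) none (some p.1)).all
          (fun prev => !(pvKey prev == pvKey p.2)))).map (·.2) := by
  induction l generalizing pre u s with
  | nil => simp [PySem.List.enumerate_nil]
  | cons ep l ih =>
    rw [List.foldl_cons, PySem.List.enumerate_cons, List.filter_cons]
    have hslice : PySem.List.slice (pre ++ ep :: l) none (some (pre.length : Int)) = pre := by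
      rw [PySem.List.slice_to_natCast]
      simp
    have hcond : (PySem.List.slice (pre ++ ep :: l) none (some ((pre.length : Int), ep).1)).all
        (fun prev => !(pvKey prev == pvKey ((pre.length : Int), ep).2))
        = !(PySem.Set.contains s (pvKey ep)) := by
      rw [hslice, hs]
      by_cases hmem : pvKey ep ∈ pre.map pvKey
      · obtain ⟨x, hx, hk⟩ := List.mem_map.mp hmem
        simp only [hmem, decide_true, Bool.not_true]
        exact List.all_eq_false.mpr ⟨x, hx, by simp [hk]⟩
      · simp only [hmem, decide_false, Bool.not_false]
        refine List.all_eq_true.mpr ?_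
        intro x hx
        simp only [Bool.not_eq_true', beq_eq_false_iff_ne, ne_eq]
        intro h
        exact hmem (List.mem_map.mpr ⟨x, hx, h⟩)
    by_cases hc : PySem.Set.contains s (pvKey ep) = true
    · have hm : pvKey ep ∈ s := by simpa [PySem.Set.contains] using hc
      have hA : stepA (s, u) ep = (s, u) := by simp [stepA, hm]
      rw [hA, hcond, hc]
      have hs' : ∀ k, PySem.Set.contains s k = decide (k ∈ (pre ++ [ep]).map pvKey) := by
        intro k
        rw [hs]
        have hmem : pvKey ep ∈ pre.map pvKey := by
          have := hs (pvKey ep); rw [hc] at this; exact of_decide_eq_true this.symm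
        simp only [List.map_append, List.map_cons, List.map_nil, List.mem_append,
          List.mem_singleton]
        by_cases hk : k = pvKey ep
        · subst hk; simp [hmem]
        · simp [hk]
      have := ih (pre ++ [ep]) u s hs'
      simpa using this
    · have hc' : PySem.Set.contains s (pvKey ep) = false := by simpa using hc
      have hm : pvKey ep ∉ s := by simpa [PySem.Set.contains] using hc'
      have hA : stepA (s, u) ep = (s ++ [pvKey ep], u ++ [ep]) := by
        simp [stepA, PySem.Set.add, hm]
      rw [hA, hcond, hc']
      have hs' : ∀ k, PySem.Set.contains (s ++ [pvKey ep]) k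
          = decide (k ∈ (pre ++ [ep]).map pvKey) := by
        intro k
        have h1 : PySem.Set.contains (s ++ [pvKey ep]) k
            = (PySem.Set.contains s k || decide (k = pvKey ep)) := by
          by_cases hk : k = pvKey ep <;> simp [PySem.Set.contains, hk]
        rw [h1, hs]
        simp only [List.map_append, List.map_cons, List.map_nil, List.mem_append,
          List.mem_singleton]
        by_cases hk : k = pvKey ep <;> simp [hk]
      have := ih (pre ++ [ep]) (u ++ [ep]) (s ++ [pvKey ep]) hs'
      simp only [List.append_assoc, List.singleton_append] at this ⊢
      rw [this]
      simp

-- ===== VERDICT =====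
theorem deduplicate_endpoints_spec : Claim_equal_deduplicate_endpoints := by
  intro endpoints _
  unfold Spec_deduplicate_endpoints deduplicate_endpoints deduplicate_endpoints_alt
  have := dedup_invariant endpoints [] [] PySem.Set.empty
    (by intro k; simp [PySem.Set.contains, PySem.Set.empty])
  exact this
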